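-- pv_equiv track=rewrite | github.com/Maxcode123/school | exercise10.py | create_bit_sequence
-- ===== SOURCE A (Python) =====
-- def create_bit_sequence(text):
--     """Returns the text received as a sequence of bits in a string. Each
--     character is converted to a 7 bit binary number, then the first two and
--     last two bits are kept and the rest are removed."""
--     bits = ""
--     for char in text:
--         number = ord(char)
--         binary = bin(number)[2:]
--         binary = (7 - len(binary)) * "0" + binary
--         outermost_bits = binary[:2] + binary[-2:]
--         bits += outermost_bits
--     return bits
-- ===== SOURCE B (Python) =====
-- def create_bit_sequence(text):
--     """Same task, by direct bit arithmetic: for each 7-bit character keep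
--     bits 6,5 (n >> 5) and bits 1,0 (n & 3), emitted as a 4-bit group."""
--     return ''.join(format(((ord(c) >> 5) << 2) | (ord(c) & 3), '04b') for c in text)
-- ===== Notes on version B (the rewrite author's own statement) =====
-- stated objective: simpler
-- what changed: B extracts the two outer bit pairs of each character arithmetically ((ord>>5)<<2 | (ord&3), formatted as 4 bits) instead of A's building a zero-padded 7-character binary string and slicing its first and last two characters.
import Mathlib
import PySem

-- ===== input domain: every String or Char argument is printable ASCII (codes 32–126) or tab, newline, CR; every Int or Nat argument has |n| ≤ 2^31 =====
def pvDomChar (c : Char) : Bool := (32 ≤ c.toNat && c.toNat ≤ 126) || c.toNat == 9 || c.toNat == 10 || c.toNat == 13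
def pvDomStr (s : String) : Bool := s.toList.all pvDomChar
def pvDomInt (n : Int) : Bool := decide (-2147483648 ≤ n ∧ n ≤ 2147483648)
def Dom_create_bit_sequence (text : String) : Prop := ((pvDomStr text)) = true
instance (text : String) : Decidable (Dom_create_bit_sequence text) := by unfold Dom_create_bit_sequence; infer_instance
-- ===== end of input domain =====

-- B keeps the outer two bit pairs of each 7-bit character by direct shifting/masking
-- instead of A's pad-to-7-string-and-slice; objective: simpler (same cost).

-- ===== PORT A =====
-- bin(n)[2:] for n > 0: most-significant-first binary digits (recursion on n / 2)
def pyBinPos (n : Nat) : List Char :=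
  if n = 0 then []
  else pyBinPos (n / 2) ++ [if n % 2 = 1 then '1' else '0']

-- bin(n)[2:] (n ≥ 0): Python gives "0" for n = 0
def pyBin (n : Nat) : List Char := if n = 0 then ['0'] else pyBinPos n

def create_bit_sequence (text : String) : String :=
  String.mk (text.toList.foldl (fun bits char =>
    let number := char.toNat                                   -- ord(char)
    let binary := pyBin number                                 -- bin(number)[2:]
    let binary := List.replicate (7 - binary.length) '0' ++ binary
      -- (7 - len(binary)) * "0" + binary; Python's negative repeat gives "" just as Nat subtraction does
    let outermost_bits := binary.take 2 ++ binary.drop (binary.length - 2)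
      -- binary[:2] + binary[-2:]; exact since binary is nonempty (len ≥ 7 here)
    bits ++ outermost_bits) [])

-- ===== PORT B =====
-- format(x, '04b') for the 4-bit values produced below: the four bits MSB first
def fmt04b (n : Nat) : List Char :=
  [if n / 8 % 2 = 1 then '1' else '0',
   if n / 4 % 2 = 1 then '1' else '0',
   if n / 2 % 2 = 1 then '1' else '0',
   if n % 2 = 1 then '1' else '0']

def create_bit_sequence_alt (text : String) : String :=
  String.mk ((text.toList.map (fun c => fmt04b ((c.toNat / 32) % 4 * 4 + c.toNat % 4))).flatten)
  -- ''.join(format(((ord(c) >> 5) << 2) | (ord(c) & 3), '04b') for c in text); on 7-bit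
  -- chars (the stated domain) (n >> 5) << 2 | (n & 3) = n / 32 % 4 * 4 + n % 4

-- ===== PRECONDITION & SPEC =====
def Spec_create_bit_sequence (text : String) (out : String) : Prop := out = create_bit_sequence_alt text
instance (text : String) (out : String) : Decidable (Spec_create_bit_sequence text out) := by unfold Spec_create_bit_sequence; infer_instance

-- ===== CLAIM (what is proved, stated in full; the proofs are below) =====
def Claim_equal_create_bit_sequence : Prop := ∀ (text : String), Dom_create_bit_sequence text → Spec_create_bit_sequence text (create_bit_sequence text)

-- ===== LEMMAS AND PROOFS =====

-- A's per-character chunk, as a function of the code point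
def chunkA (n : Nat) : List Char :=
  let binary := pyBin n
  let binary := List.replicate (7 - binary.length) '0' ++ binary
  binary.take 2 ++ binary.drop (binary.length - 2)

theorem chunk_eq (n : Nat) (h : n < 128) :
    chunkA n = fmt04b (n / 32 % 4 * 4 + n % 4) := by
  interval_cases n <;> simp [chunkA, pyBin, pyBinPos, fmt04b]

theorem fold_eq (l : List Char) (acc : List Char) (h : l.all pvDomChar = true) :
    l.foldl (fun bits char => bits ++ chunkA char.toNat) acc
      = acc ++ (l.map (fun c => fmt04b ((c.toNat / 32) % 4 * 4 + c.toNat % 4))).flatten := by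
  induction l generalizing acc with
  | nil => simp
  | cons c cs ih =>
    simp only [List.all_cons, Bool.and_eq_true] at h
    have hc : c.toNat < 128 := by
      simp only [pvDomChar, Bool.or_eq_true, Bool.and_eq_true, decide_eq_true_eq,
        beq_iff_eq] at h
      omega
    simp only [List.foldl_cons, List.map_cons, List.flatten_cons]
    rw [ih _ h.2, chunk_eq _ hc, List.append_assoc]

-- ===== VERDICT (by name: the statement is the Claim_ definition above) =====
theorem create_bit_sequence_spec : Claim_equal_create_bit_sequence := by
  intro text hdom
  unfold Spec_create_bit_sequence create_bit_sequence create_bit_sequence_alt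
  have := fold_eq text.toList [] hdom
  simp only [List.nil_append] at this
  exact congrArg String.mk this
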